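-- pv_equiv track=rewrite | github.com/luckstech/prog2 | fichas/2_complexidade/complexidade.py | prog5_c
-- ===== SOURCE A (Python) =====
-- def prog5_c(n):
--     b = n * n
--     while b > n:
--         if b % 2 == 0:
--             b -= 1
--         else:
--             b -= 2
--     return b
-- ===== SOURCE B (Python) =====
-- def prog5_c(n):
--     # Closed form: the loop walks down from n*n in odd steps; it lands on n
--     # when n is odd, on n-1 when n is even and nonzero, and never runs for n == 0.
--     if n == 0:
--         return 0
--     return n if n % 2 else n - 1
-- ===== Notes on version B (the rewrite author's own statement) =====
-- stated objective: faster
-- what changed: Replaced the O(n^2)-iteration countdown loop with a parity-based closed form (n if odd, n-1 if even nonzero, 0 if zero).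
import Mathlib
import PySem

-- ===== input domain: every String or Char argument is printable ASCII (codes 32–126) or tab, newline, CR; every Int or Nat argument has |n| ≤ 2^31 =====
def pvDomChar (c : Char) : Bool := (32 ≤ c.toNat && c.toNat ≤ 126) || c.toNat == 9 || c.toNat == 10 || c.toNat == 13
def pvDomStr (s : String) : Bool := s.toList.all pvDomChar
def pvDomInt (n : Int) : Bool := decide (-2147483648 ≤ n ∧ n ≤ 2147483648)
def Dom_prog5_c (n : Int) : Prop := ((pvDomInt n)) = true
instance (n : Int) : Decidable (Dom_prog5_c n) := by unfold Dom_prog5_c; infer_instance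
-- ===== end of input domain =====

-- B replaces A's step-by-step countdown loop with an O(1) parity closed form; return values agree for all ints.

-- ===== PORT A =====
-- the while loop of A: while b > n: b -= 1 if b even else b -= 2
def prog5_c_loop (n b : Int) : Int :=
  if _h : b > n then
    if b % 2 = 0 then prog5_c_loop n (b - 1) else prog5_c_loop n (b - 2)
  else b
termination_by (b - n).toNat
decreasing_by all_goals omega

def prog5_c (n : Int) : Int := prog5_c_loop n (n * n)

-- ===== PORT B =====
def prog5_c_alt (n : Int) : Int :=
  if n = 0 then 0
  else if n % 2 = 0 then n - 1 else n

-- ===== PRECONDITION & SPEC =====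
def Spec_prog5_c (n : Int) (out : Int) : Prop := out = prog5_c_alt n
instance (n : Int) (out : Int) : Decidable (Spec_prog5_c n out) := by unfold Spec_prog5_c; infer_instance

-- ===== CLAIM (what is proved, stated in full; the proofs are below) =====
def Claim_equal_prog5_c : Prop := ∀ (n : Int), Dom_prog5_c n → Spec_prog5_c n (prog5_c n)

-- ===== LEMMAS AND PROOFS =====

-- If b is odd, t is the odd value with t ≤ n < t + 2, and t ≤ b, the loop lands exactly on t.
theorem prog5_c_loop_odd (n b t : Int) (ht : t % 2 = 1) (h1 : t ≤ n) (h2 : n < t + 2)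
    (hb : b % 2 = 1) (htb : t ≤ b) : prog5_c_loop n b = t := by
  fun_induction prog5_c_loop n b with
  | case1 b hgt hev ih => omega
  | case2 b hgt hev ih =>
      exact ih (by omega) (by omega)
  | case3 b hle => omega

theorem int_le_mul_self (n : Int) : n ≤ n * n := by
  have h : 0 ≤ n * (n - 1) := by
    rcases Int.lt_or_le n 1 with h | h
    · nlinarith [mul_nonneg (show (0:Int) ≤ -n by omega) (show (0:Int) ≤ -(n-1) by omega)]
    · exact mul_nonneg (by omega) (by omega)
  nlinarith

theorem sq_emod_two (n : Int) : (n * n) % 2 = n % 2 := by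
  conv_lhs => rw [Int.mul_emod]
  have := Int.emod_emod_of_dvd n (dvd_refl 2)
  rcases Int.emod_two_eq_zero_or_one n with h | h <;> simp [h]

-- ===== VERDICT (by name: the statement is the Claim_ definition above) =====
theorem prog5_c_spec : Claim_equal_prog5_c := by
  intro n _
  unfold Spec_prog5_c prog5_c prog5_c_alt
  have hle := int_le_mul_self n
  have hmod := sq_emod_two n
  by_cases h0 : n = 0
  · subst h0
    rw [prog5_c_loop]
    simp
  · rcases Int.emod_two_eq_zero_or_one n with he | ho
    · -- n even, nonzero: loop enters once (b even), then odd descent to n - 1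
      have hgt : n * n > n := by
        rcases Int.lt_or_le n 0 with h | h
        · nlinarith
        · have h2 : 2 ≤ n := by omega
          nlinarith
      rw [prog5_c_loop]
      simp only [hgt, dite_true]
      rw [if_pos (by omega : (n * n) % 2 = 0)]
      rw [prog5_c_loop_odd n (n * n - 1) (n - 1) (by omega) (by omega) (by omega)
        (by omega) (by omega)]
      simp [h0, he]
    · -- n odd: b = n*n is odd, descent lands on n
      rw [prog5_c_loop_odd n (n * n) n ho le_rfl (by omega) (by omega) hle]
      simp [h0, ho]
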